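-- pv_equiv track=rewrite | github.com/prefer52/algorithm-week | 프로그래머스/lv2/17683. ［3차］ 방금그곡/［3차］ 방금그곡.py | solution
-- ===== SOURCE A (Python) =====
-- def solution(m, musicinfo):
--     length = len(musicinfo)
--     musics, queue = [[]]*length, []
--     sharp_pair = {'C#':'c', 'D#':'d', 'F#':'f', 'G#':'g', 'A#':'a'}.items()
--     for sharp in sharp_pair:
--         m = m.replace(sharp[0], sharp[1])
--     for i in range(length):
--         musics[i] = musicinfo[i].split(',')
--         for j in range(2):
--             musics[i][j] = list(map(int, musics[i][j].split(':')))
--             musics[i][j] = musics[i][j][0]*60 + musics[i][j][1]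
--         musics[i][1] -= musics[i][0]
--         for sharp in sharp_pair:
--             musics[i][3] = musics[i][3].replace(sharp[0], sharp[1])
--         melody = divmod(musics[i][1], len(musics[i][3]))
--         musics[i][3] = musics[i][3]*melody[0] + musics[i][3][0:melody[1]]
--
--     for music in musics:
--         if m in music[3]:
--             queue.append(music)
--     if queue:
--         queue.sort(key=lambda x:x[1], reverse=True)
--         return queue[0][2]
--     else:
--         return '(None)'
-- ===== SOURCE B (Python) =====
-- def solution(m, musicinfo):
--     def flat(s):
--         for old, new in (('C#', 'c'), ('D#', 'd'), ('F#', 'f'), ('G#', 'g'), ('A#', 'a')):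
--             s = s.replace(old, new)
--         return s
--
--     def secs(t):
--         parts = t.split(':')
--         return int(parts[0]) * 60 + int(parts[1])
--
--     query = flat(m)
--     best_id = '(None)'
--     best_dur = None
--     for info in musicinfo:
--         fields = info.split(',')
--         dur = secs(fields[1]) - secs(fields[0])
--         sheet = flat(fields[3])
--         q, r = divmod(dur, len(sheet))
--         played = sheet * q + sheet[:r]
--         if query in played:
--             if best_dur is None or best_dur < dur:
--                 best_id, best_dur = fields[2], dur
--     return best_id
-- ===== Notes on version B (the rewrite author's own statement) =====
-- stated objective: simpler
-- what changed: B is a single pass that tracks the best matching id and duration in two scalar variables with a strict > comparison (earliest entry wins ties), instead of A's build-a-list-of-parsed-entries, filter into a queue, stable descending sort and take queue[0][2].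
import Mathlib
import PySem

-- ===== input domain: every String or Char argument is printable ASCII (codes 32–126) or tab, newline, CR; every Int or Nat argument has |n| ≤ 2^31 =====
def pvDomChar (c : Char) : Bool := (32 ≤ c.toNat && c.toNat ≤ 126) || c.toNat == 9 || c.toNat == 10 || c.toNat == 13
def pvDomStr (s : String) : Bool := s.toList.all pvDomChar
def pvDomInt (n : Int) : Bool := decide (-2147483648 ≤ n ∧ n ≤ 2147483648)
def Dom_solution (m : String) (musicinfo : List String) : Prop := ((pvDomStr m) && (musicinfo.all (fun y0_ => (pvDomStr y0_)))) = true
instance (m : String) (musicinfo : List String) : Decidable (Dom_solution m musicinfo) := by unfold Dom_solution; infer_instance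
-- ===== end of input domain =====

-- B replaces A's build-list / filter / stable-descending-sort / take-[0] pipeline by a single pass that
-- tracks the best matching id and duration in two scalar accumulators (strict > keeps the earliest tie).

-- helpers identical in both Pythons: the sharp-lowering replace chain and info.split(',')
def pySharp (cs : List Char) : List Char :=
  PySem.Chars.replace (PySem.Chars.replace (PySem.Chars.replace (PySem.Chars.replace
    (PySem.Chars.replace cs ['C', '#'] ['c']) ['D', '#'] ['d']) ['F', '#'] ['f']) ['G', '#'] ['g']) ['A', '#'] ['a']

def pyFields (s : String) : List String := (PySem.Str.split? s ",").getD []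

-- ===== PORT A =====
-- A: musics[i][j] = list(map(int, t.split(':'))); musics[i][j] = [0]*60 + [1]
-- (the .getD defaults are only reached outside Pre_solution, where Python raises)
def timeSecA (f : String) : Int :=
  (((PySem.Str.split? f ":").getD []).map (fun p => (PySem.Int.ofStr? p).getD 0)).getD 0 0 * 60 +
    (((PySem.Str.split? f ":").getD []).map (fun p => (PySem.Int.ofStr? p).getD 0)).getD 1 0

def durA (s : String) : Int := timeSecA ((pyFields s).getD 1 "") - timeSecA ((pyFields s).getD 0 "")

def sheetA (s : String) : List Char := pySharp ((pyFields s).getD 3 "").toList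

-- musics[i][3] = musics[i][3]*melody[0] + musics[i][3][0:melody[1]]  with melody = divmod(dur, len)
def fullA (s : String) : List Char :=
  PySem.List.pyRepeat (sheetA s) (PySem.Int.floordiv (durA s) ((sheetA s).length : Int)) ++
    PySem.List.slice (sheetA s) (some 0) (some (PySem.Int.mod (durA s) ((sheetA s).length : Int)))

-- one iteration of A's 'for i in range(length)' body: the parts of musics[i] used later
def parseEntryA (s : String) : Int × String × List Char :=
  (durA s, (pyFields s).getD 2 "", fullA s)

def solution (m : String) (musicinfo : List String) : String :=
  if ((musicinfo.map parseEntryA).foldl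
      (fun acc mu => if PySem.Chars.isIn (pySharp m.toList) mu.2.2 then acc ++ [mu] else acc)
      ([] : List (Int × String × List Char))) ≠ [] then
    (PySem.List.pyGetD (PySem.List.sorted
      ((musicinfo.map parseEntryA).foldl
        (fun acc mu => if PySem.Chars.isIn (pySharp m.toList) mu.2.2 then acc ++ [mu] else acc) [])
      (fun x => x.1) true) 0 (0, "", [])).2.1
  else "(None)"

-- ===== PORT B =====
-- B: secs(t) = int(parts[0])*60 + int(parts[1])
def secsB (t : String) : Int :=
  (PySem.Int.ofStr? (((PySem.Str.split? t ":").getD []).getD 0 "")).getD 0 * 60 +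
    (PySem.Int.ofStr? (((PySem.Str.split? t ":").getD []).getD 1 "")).getD 0

def durB (info : String) : Int := secsB ((pyFields info).getD 1 "") - secsB ((pyFields info).getD 0 "")

def sheetB (info : String) : List Char := pySharp ((pyFields info).getD 3 "").toList

-- played = sheet * q + sheet[:r]  with q, r = divmod(dur, len(sheet))
def playedB (info : String) : List Char :=
  PySem.List.pyRepeat (sheetB info) (PySem.Int.floordiv (durB info) ((sheetB info).length : Int)) ++
    PySem.List.slice (sheetB info) (some 0) (some (PySem.Int.mod (durB info) ((sheetB info).length : Int)))

-- the body of B's single loop: update (best_id, best_dur) from one entry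
def bStep (query : List Char) (acc : String × Option Int) (info : String) : String × Option Int :=
  if PySem.Chars.isIn query (playedB info) then
    match acc.2 with
    | none => ((pyFields info).getD 2 "", some (durB info))
    | some b => if b < durB info then ((pyFields info).getD 2 "", some (durB info)) else acc
  else acc

def solution_alt (m : String) (musicinfo : List String) : String :=
  (musicinfo.foldl (bStep (pySharp m.toList)) ("(None)", (none : Option Int))).1

-- ===== PRECONDITION & SPEC =====
-- Pre_: exactly the entries A parses without raising: ≥ 4 comma fields, each ':'-part of the two time
-- fields int()-parsable with at least two parts, and the sharp-lowered melody nonempty (else ZeroDivisionError).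
def timeFieldOk (f : String) : Bool :=
  ((PySem.Str.split? f ":").getD []).all (fun p => (PySem.Int.ofStr? p).isSome) &&
    decide (2 ≤ ((PySem.Str.split? f ":").getD []).length)

def entryOk (s : String) : Bool :=
  decide (4 ≤ (pyFields s).length) && timeFieldOk ((pyFields s).getD 0 "") &&
    timeFieldOk ((pyFields s).getD 1 "") && decide (pySharp ((pyFields s).getD 3 "").toList ≠ [])

def Pre_solution (m : String) (musicinfo : List String) : Prop :=
  musicinfo.all entryOk = true

instance (m : String) (musicinfo : List String) : Decidable (Pre_solution m musicinfo) := by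
  unfold Pre_solution; infer_instance

def pvWitness_solution : String × List String :=
  ("ABC", ["00:01,00:09,WORLD,ABCDEF", "00:00,00:05,HELLO,C#ABC"])

def Spec_solution (m : String) (musicinfo : List String) (out : String) : Prop := out = solution_alt m musicinfo
instance (m : String) (musicinfo : List String) (out : String) : Decidable (Spec_solution m musicinfo out) := by unfold Spec_solution; infer_instance

-- ===== CLAIM (what is proved, stated in full; the proofs are below) =====
def Claim_equal_solution : Prop := ∀ (m : String) (musicinfo : List String), Dom_solution m musicinfo → Pre_solution m musicinfo → Spec_solution m musicinfo (solution m musicinfo)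

-- ===== LEMMAS AND PROOFS =====

-- the two time parsers agree on every string (A indexes the int-mapped part list at 0 and 1,
-- B maps int over exactly those two parts; the out-of-range defaults coincide as well)
theorem map_int_getD (ps : List String) (j : Nat) :
    (ps.map (fun p => (PySem.Int.ofStr? p).getD 0)).getD j 0 =
      (PySem.Int.ofStr? (ps.getD j "")).getD 0 := by
  rw [List.getD_eq_getElem?_getD, List.getD_eq_getElem?_getD, List.getElem?_map]
  cases hj : ps[j]? with
  | none => simp; decide
  | some v => simp

theorem timeSec_eq (f : String) : timeSecA f = secsB f := by
  unfold timeSecA secsB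
  rw [map_int_getD, map_int_getD]

theorem durB_eq (s : String) : durB s = durA s := by
  unfold durA durB
  rw [timeSec_eq, timeSec_eq]

theorem playedB_eq (s : String) : playedB s = fullA s := by
  unfold playedB fullA sheetB sheetA
  rw [durB_eq]

-- Python's max(xs, key): one strict-improvement step on the running first-max option
def maxStep {α κ : Type} [LinearOrder κ] (key : α → κ) (o : Option α) (x : α) : Option α :=
  match o with
  | none => some x
  | some mx => if key mx < key x then some x else some mx

-- B's loop step, phrased on the parsed entry
def bestStep {α : Type} (p : α → Bool) (key : α → Int) (idf : α → String)
    (acc : String × Option Int) (x : α) : String × Option Int :=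
  if p x then
    match acc.2 with
    | none => (idf x, some (key x))
    | some b => if b < key x then (idf x, some (key x)) else acc
  else acc

-- B's scalar state as the image of the running first-max option
def optState {α : Type} (key : α → Int) (idf : α → String) (o : Option α) : String × Option Int :=
  (o.elim "(None)" idf, o.map key)

theorem bStep_eq (q : List Char) (acc : String × Option Int) (info : String) :
    bStep q acc info =
      bestStep (fun mu : Int × String × List Char => PySem.Chars.isIn q mu.2.2)
        (fun mu => mu.1) (fun mu => mu.2.1) acc (parseEntryA info) := by
  obtain ⟨a, o⟩ := acc
  cases o <;> simp [bStep, bestStep, parseEntryA, playedB_eq, durB_eq]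

theorem bestStep_optState {α : Type} (p : α → Bool) (key : α → Int) (idf : α → String)
    (o : Option α) (x : α) :
    bestStep p key idf (optState key idf o) x =
      optState key idf (if p x then maxStep key o x else o) := by
  by_cases hp : p x = true
  · cases o with
    | none => simp [bestStep, optState, maxStep, hp]
    | some mx =>
      by_cases hlt : key mx < key x <;> simp [bestStep, optState, maxStep, hp, hlt]
  · simp [bestStep, optState, hp]

theorem foldl_bestStep {α : Type} (p : α → Bool) (key : α → Int) (idf : α → String) :
    ∀ (l : List α) (o : Option α),
      l.foldl (bestStep p key idf) (optState key idf o) =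
        optState key idf (l.foldl (fun o x => if p x then maxStep key o x else o) o) := by
  intro l
  induction l with
  | nil => intro o; rfl
  | cons x t ih =>
    intro o
    simp only [List.foldl_cons]
    rw [bestStep_optState, ih]

theorem foldl_maxStep_eq_max? {α : Type} (key : α → Int) (l : List α) :
    l.foldl (maxStep key) none = PySem.List.max? l key := by
  unfold PySem.List.max?
  apply PySem.List.foldl_congr_mem
  intro acc x _
  cases acc <;> rfl

theorem foldl_best {α : Type} (p : α → Bool) (key : α → Int) (idf : α → String) (l : List α) :
    l.foldl (bestStep p key idf) ("(None)", (none : Option Int)) =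
      optState key idf (PySem.List.max? (l.filter p) key) := by
  rw [show (("(None)", (none : Option Int)) : String × Option Int) = optState key idf none from rfl]
  rw [foldl_bestStep, PySem.List.foldl_if_eq_foldl_filter]
  rw [foldl_maxStep_eq_max?]

-- head of insertBy with the reverse comparator is one strict-max step
theorem head_insertBy {α κ : Type} [LinearOrder κ] (key : α → κ) (x : α) (acc : List α) :
    (PySem.List.insertBy (fun a b => decide (key b < key a)) x acc).head? =
      maxStep key acc.head? x := by
  cases acc with
  | nil => simp [PySem.List.insertBy, maxStep]
  | cons y ys =>
    by_cases h : key y < key x <;> simp [PySem.List.insertBy, maxStep, h]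

theorem head_foldl_insertBy {α κ : Type} [LinearOrder κ] (key : α → κ) :
    ∀ (l : List α) (acc : List α),
      (l.foldl (fun acc x => PySem.List.insertBy (fun a b => decide (key b < key a)) x acc) acc).head? =
        l.foldl (maxStep key) acc.head? := by
  intro l
  induction l with
  | nil => intro acc; rfl
  | cons x t ih =>
    intro acc
    simp only [List.foldl_cons]
    rw [ih, head_insertBy]

-- head of the stable descending sort is the FIRST element with maximal key, i.e. Python's max(xs, key)
theorem head_sorted_rev {α : Type} (l : List α) (key : α → Int) :
    (PySem.List.sorted l key true).head? = PySem.List.max? l key := by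
  rw [PySem.List.sorted_rev_eq_foldl_insertBy, head_foldl_insertBy]
  simp only [List.head?_nil]
  rw [foldl_maxStep_eq_max?]

-- ===== VERDICT (by name: the statement is the Claim_ definition above) =====
theorem solution_spec : Claim_equal_solution := by
  intro m musicinfo _hdom _hpre
  unfold Spec_solution solution solution_alt
  have hstep : musicinfo.foldl (bStep (pySharp m.toList)) ("(None)", (none : Option Int)) =
      (musicinfo.map parseEntryA).foldl
        (bestStep (fun mu : Int × String × List Char => PySem.Chars.isIn (pySharp m.toList) mu.2.2)
          (fun mu => mu.1) (fun mu => mu.2.1)) ("(None)", (none : Option Int)) := by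
    rw [List.foldl_map]
    apply PySem.List.foldl_congr_mem
    intro acc s _
    exact bStep_eq (pySharp m.toList) acc s
  rw [hstep, foldl_best]
  rw [PySem.List.foldl_append_if_eq_filter]
  simp only [List.nil_append]
  have hhead := head_sorted_rev ((musicinfo.map parseEntryA).filter
    (fun mu => PySem.Chars.isIn (pySharp m.toList) mu.2.2)) (fun mu => mu.1)
  cases hmax : PySem.List.max? ((musicinfo.map parseEntryA).filter
      (fun mu => PySem.Chars.isIn (pySharp m.toList) mu.2.2)) (fun mu : Int × String × List Char => mu.1) with
  | none =>
    have hq : ((musicinfo.map parseEntryA).filter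
        (fun mu => PySem.Chars.isIn (pySharp m.toList) mu.2.2)) = [] := by
      rw [PySem.List.max?_eq_none_iff] at hmax
      exact hmax
    simp [hq, optState]
  | some mu =>
    have hq : ((musicinfo.map parseEntryA).filter
        (fun mu => PySem.Chars.isIn (pySharp m.toList) mu.2.2)) ≠ [] := by
      intro h
      rw [h] at hmax
      simp [PySem.List.max?] at hmax
    rw [hmax] at hhead
    simp only [ne_eq, hq, not_false_iff, if_pos]
    rw [PySem.List.pyGetD_zero]
    cases hs : (PySem.List.sorted ((musicinfo.map parseEntryA).filter
        (fun mu => PySem.Chars.isIn (pySharp m.toList) mu.2.2)) (fun x => x.1) true) with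
    | nil => rw [hs] at hhead; simp at hhead
    | cons a t =>
      rw [hs] at hhead
      simp only [List.head?_cons, Option.some.injEq] at hhead
      simp [hhead, optState]
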